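-- pv_equiv track=rewrite | github.com/GodOrGovern/Project_Euler | problems/Python/e125.py | squares_to
-- ===== SOURCE A (Python) =====
-- def squares_to(end):
--     ''' Returns a list of squares up to 'end'. The value at each index 'i' is
--     'i**2 '''
--     sqrs = [0]
--     n = 1
--     n_sqr = 1
--     while n_sqr < end:
--         sqrs.append(n_sqr)
--         n_sqr += 2*n + 1
--         n += 1
--     if n_sqr == end:
--         sqrs.append(n_sqr)
--     return sqrs
-- ===== SOURCE B (Python) =====
-- def squares_to(end):
--     ''' Returns a list of squares up to 'end'. The value at each index 'i' is
--     'i**2'. Count-then-generate: compute r = floor(sqrt(end)) by Newton's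
--     integer iteration, then emit the squares directly. '''
--     if end < 1:
--         return [0]
--     x = end
--     y = (x + 1) // 2
--     while y < x:
--         x = y
--         y = (x + end // x) // 2
--     return [i * i for i in range(x + 1)]
-- ===== Notes on version B (the rewrite author's own statement) =====
-- stated objective: alternative
-- what changed: B first computes r = floor(sqrt(end)) with Newton's integer iteration and then emits [i*i for i in range(r+1)] in one comprehension, instead of A's incremental accumulation of each next square via n_sqr += 2*n+1 with a post-loop equality check.
import Mathlib
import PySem

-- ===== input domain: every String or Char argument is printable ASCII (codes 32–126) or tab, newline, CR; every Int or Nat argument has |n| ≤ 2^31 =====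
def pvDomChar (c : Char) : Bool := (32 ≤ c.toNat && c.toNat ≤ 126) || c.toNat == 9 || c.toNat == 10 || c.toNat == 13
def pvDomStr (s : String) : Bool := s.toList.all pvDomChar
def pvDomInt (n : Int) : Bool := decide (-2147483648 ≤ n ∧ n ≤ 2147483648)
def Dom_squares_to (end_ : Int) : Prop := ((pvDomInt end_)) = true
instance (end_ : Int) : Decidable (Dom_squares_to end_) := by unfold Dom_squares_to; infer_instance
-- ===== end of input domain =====

-- B replaces A's incremental square accumulation (n_sqr += 2*n+1 with a post-loop equality
-- check) by count-then-generate: Newton integer isqrt, then emit the squares directly.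


-- ===== PORT A =====
-- A's while loop: state (sqrs, n, n_sqr); the hypothesis 1 ≤ n only makes the loop total.
def squaresToLoop (end_ : Int) (sqrs : List Int) (n n_sqr : Int) (hn : 1 ≤ n) : List Int :=
  if n_sqr < end_ then
    squaresToLoop end_ (sqrs ++ [n_sqr]) (n + 1) (n_sqr + (2 * n + 1)) (by omega)
  else if n_sqr = end_ then sqrs ++ [n_sqr] else sqrs
termination_by (end_ - n_sqr).toNat
decreasing_by omega

def squares_to (end_ : Int) : List Int :=
  squaresToLoop end_ [0] 1 1 (by norm_num)

-- ===== PORT B =====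
-- the Newton step stays ≥ 1 (totality guard for the loop below)
lemma pv_newton_step_pos (n x : Int) (hn : 1 ≤ n) (hx : 1 ≤ x) :
    1 ≤ PySem.Int.floordiv (x + PySem.Int.floordiv n x) 2 := by
  rw [PySem.Int.le_floordiv_iff_mul_le (by norm_num : (0:Int) < 2)]
  have hdnn : 0 ≤ PySem.Int.floordiv n x := by
    rw [PySem.Int.floordiv_eq_ediv_of_pos (by omega)]
    exact Int.ediv_nonneg (by omega) (by omega)
  rcases lt_or_ge x 2 with hx1 | hx2
  · have hx1' : x = 1 := by omega
    have : PySem.Int.floordiv n x = n := by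
      rw [hx1', PySem.Int.floordiv_eq_ediv_of_pos (by norm_num), Int.ediv_one]
    omega
  · omega

-- B's while loop: x := y; y := (x + end // x) // 2 while y < x, started at x = end.
def newtonLoop (n x : Int) (hn : 1 ≤ n) (hx : 1 ≤ x) : Int :=
  if PySem.Int.floordiv (x + PySem.Int.floordiv n x) 2 < x then
    newtonLoop n (PySem.Int.floordiv (x + PySem.Int.floordiv n x) 2) hn
      (pv_newton_step_pos n x hn hx)
  else x
termination_by x.toNat
decreasing_by have := pv_newton_step_pos n x hn hx; omega

def squares_to_alt (end_ : Int) : List Int :=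
  if h : end_ < 1 then [0]
  else
    (PySem.List.pyRange 0 (newtonLoop end_ end_ (by omega) (by omega) + 1) 1).map
      (fun i => i * i)

-- ===== PRECONDITION & SPEC =====
def Spec_squares_to (end_ : Int) (out : List Int) : Prop := out = squares_to_alt end_
instance (end_ : Int) (out : List Int) : Decidable (Spec_squares_to end_ out) := by unfold Spec_squares_to; infer_instance

-- ===== CLAIM (what is proved, stated in full; the proofs are below) =====
def Claim_equal_squares_to : Prop := ∀ (end_ : Int), Dom_squares_to end_ → Spec_squares_to end_ (squares_to end_)

-- ===== LEMMAS AND PROOFS =====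

-- the Newton step, written over Nat
lemma pv_newton_step_cast (n x : Int) (hn : 1 ≤ n) (hx : 1 ≤ x) :
    PySem.Int.floordiv (x + PySem.Int.floordiv n x) 2 =
      (Nat.cast ((x.toNat + n.toNat / x.toNat) / 2) : Int) := by
  have hn' : n = ((n.toNat : Nat) : Int) := by omega
  have hx' : x = ((x.toNat : Nat) : Int) := by omega
  rw [hn', hx', PySem.Int.floordiv_natCast]
  have : ((x.toNat : Int) + ((n.toNat / x.toNat : Nat) : Int)) =
      (((x.toNat + n.toNat / x.toNat : Nat) : Nat) : Int) := by push_cast; ring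
  rw [this]
  exact_mod_cast PySem.Int.floordiv_natCast (x.toNat + n.toNat / x.toNat) 2

-- B's Newton loop is core's `Nat.sqrt.iter` transported to Int
lemma newtonLoop_eq_iter (n x : Int) (hn : 1 ≤ n) (hx : 1 ≤ x) :
    newtonLoop n x hn hx = ((Nat.sqrt.iter n.toNat x.toNat : Nat) : Int) := by
  fun_induction newtonLoop n x hn hx with
  | case1 x hx h ih =>
    have hstep := pv_newton_step_cast n x hn hx
    have hcond : (x.toNat + n.toNat / x.toNat) / 2 < x.toNat := by
      rw [hstep] at h; omega
    have htn : (PySem.Int.floordiv (x + PySem.Int.floordiv n x) 2).toNat =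
        (x.toNat + n.toNat / x.toNat) / 2 := by rw [hstep, Int.toNat_natCast]
    rw [ih, htn]
    conv_rhs => rw [Nat.sqrt.iter]
    rw [dif_pos hcond]
  | case2 x hx h =>
    have hstep := pv_newton_step_cast n x hn hx
    have hcond : ¬ (x.toNat + n.toNat / x.toNat) / 2 < x.toNat := by
      rw [hstep] at h; omega
    conv_rhs => rw [Nat.sqrt.iter]
    rw [dif_neg hcond]
    omega

-- B's Newton loop computes the floor square root
lemma newtonLoop_sqrt (n : Int) (hn : 1 ≤ n) (h1 : 1 ≤ n) :
    newtonLoop n n hn h1 = ((Nat.sqrt n.toNat : Nat) : Int) := by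
  rw [newtonLoop_eq_iter]
  congr 1
  have hle : Nat.sqrt.iter n.toNat n.toNat * Nat.sqrt.iter n.toNat n.toNat ≤ n.toNat :=
    Nat.sqrt.iter_sq_le n.toNat n.toNat
  have hlt : n.toNat < (Nat.sqrt.iter n.toNat n.toNat + 1) * (Nat.sqrt.iter n.toNat n.toNat + 1) :=
    Nat.sqrt.lt_iter_succ_sq n.toNat n.toNat (by nlinarith)
  refine le_antisymm (Nat.le_sqrt.mpr hle) ?_
  have : Nat.sqrt n.toNat < Nat.sqrt.iter n.toNat n.toNat + 1 := by
    rw [Nat.sqrt_lt', pow_two]; exact hlt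
  omega

-- A's loop produces the tail of the square table
lemma squaresToLoop_spec (end_ : Int) (sqrs : List Int) (n n_sqr : Int) (hn : 1 ≤ n) :
    1 ≤ end_ → n_sqr = n * n →
    squaresToLoop end_ sqrs n n_sqr hn =
      sqrs ++ (List.range' n.toNat (Nat.sqrt end_.toNat + 1 - n.toNat)).map
        (fun i : Nat => (i : Int) * (i : Int)) := by
  fun_induction squaresToLoop end_ sqrs n n_sqr hn with
  | case1 sqrs n n_sqr hn h ih =>
    intro he hinv
    rw [ih he (by rw [hinv]; ring)]
    have hnn : ((n.toNat : Nat) : Int) = n := Int.toNat_of_nonneg (by omega)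
    have hkk : n * n = ((n.toNat * n.toNat : Nat) : Int) := by
      rw [Int.natCast_mul, hnn]
    have hks : n.toNat ≤ Nat.sqrt end_.toNat := by
      refine Nat.le_sqrt.mpr ?_
      have : ((n.toNat * n.toNat : Nat) : Int) < end_ := by rw [← hkk, ← hinv]; exact h
      omega
    have h1 : (n + 1).toNat = n.toNat + 1 := by omega
    have h2 : Nat.sqrt end_.toNat + 1 - n.toNat = (Nat.sqrt end_.toNat - n.toNat) + 1 := by omega
    have h3 : Nat.sqrt end_.toNat + 1 - (n.toNat + 1) = Nat.sqrt end_.toNat - n.toNat := by omega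
    rw [h1, h2, h3, List.range'_succ, List.map_cons]
    have hval : ((n.toNat : Nat) : Int) * ((n.toNat : Nat) : Int) = n_sqr := by
      rw [hnn, ← hinv]
    rw [hval]
    simp [List.append_assoc]
  | case2 sqrs n hn h =>
    intro he hinv
    have hnn : ((n.toNat : Nat) : Int) = n := Int.toNat_of_nonneg (by omega)
    have hkk : ((n.toNat * n.toNat : Nat) : Int) = end_ := by
      rw [Int.natCast_mul, hnn, ← hinv]
    have hsq : Nat.sqrt end_.toNat = n.toNat := by
      have : end_.toNat = n.toNat * n.toNat := by omega
      rw [this, Nat.sqrt_eq]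
    rw [hsq]
    have h4 : n.toNat + 1 - n.toNat = 1 := by omega
    rw [h4, List.range'_one, List.map_singleton]
    have : ((n.toNat : Nat) : Int) * ((n.toNat : Nat) : Int) = end_ := by
      rw [hnn, ← hinv]
    rw [this]
  | case3 sqrs n hn h hne =>
    intro he hinv
    have hnn : ((n.toNat : Nat) : Int) = n := Int.toNat_of_nonneg (by omega)
    have hgt : end_.toNat < n.toNat * n.toNat := by
      have : end_ < ((n.toNat * n.toNat : Nat) : Int) := by
        rw [Int.natCast_mul, hnn, ← hinv]; omega
      omega
    have hs : Nat.sqrt end_.toNat < n.toNat := by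
      rw [Nat.sqrt_lt', pow_two]; exact hgt
    have h5 : Nat.sqrt end_.toNat + 1 - n.toNat = 0 := by omega
    rw [h5]
    simp

-- ===== VERDICT (by name: the statement is the Claim_ definition above) =====
theorem squares_to_spec : Claim_equal_squares_to := by
  intro end_ _hdom
  unfold Spec_squares_to
  by_cases hlt : end_ < 1
  · unfold squares_to
    rw [squaresToLoop, if_neg (by omega), if_neg (by omega)]
    unfold squares_to_alt
    rw [dif_pos hlt]
  · have he : 1 ≤ end_ := by omega
    unfold squares_to
    rw [squaresToLoop_spec end_ [0] 1 1 (by norm_num) he (by norm_num)]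
    unfold squares_to_alt
    rw [dif_neg hlt, newtonLoop_sqrt end_ (by omega) (by omega)]
    rw [PySem.List.pyRange_one, List.map_map, List.range_eq_range']
    have hlen : (((Nat.sqrt end_.toNat : Nat) : Int) + 1 - 0).toNat = Nat.sqrt end_.toNat + 1 := by
      omega
    rw [hlen, List.range'_succ, List.map_cons]
    have h11 : ((1:Int)).toNat = 1 := by omega
    have h12 : Nat.sqrt end_.toNat + 1 - 1 = Nat.sqrt end_.toNat := by omega
    rw [h11, h12]
    simp [Function.comp]
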